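-- pv_equiv track=rewrite | github.com/pideviq/quizzes | Python/fb_hc_2013_beautiful_strings.py | beauty2
-- ===== SOURCE A (Python) =====
-- from string import ascii_lowercase
--
-- def beauty2(string):
--     '''
--     Define the beauty of the given string (alternative variant)
--     '''
--     string = string.lower()
--     letters = {}
--
--     for char in string:
--         if char in ascii_lowercase:
--             if char not in letters:
--                 letters[char] = 0
--             else:
--                 letters[char] += 1
--
--     frequency = sorted(letters, key=lambda i: letters[i], reverse=True)
--     values = {letter: 26 - i for i, letter in enumerate(frequency)}
--
--     return sum(values[letter] for letter in string if letter in values)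
-- ===== SOURCE B (Python) =====
-- from string import ascii_lowercase
--
-- def beauty2(string):
--     '''
--     Define the beauty of the given string (alternative variant)
--     '''
--     counts = {}
--     for char in string.lower():
--         if char in ascii_lowercase:
--             counts[char] = counts.get(char, 0) + 1
--     ranked = sorted(counts.items(), key=lambda kv: kv[1], reverse=True)
--     return sum(c * (26 - i) for i, (_, c) in enumerate(ranked))
-- ===== Notes on version B (the rewrite author's own statement) =====
-- stated objective: alternative
-- what changed: B keeps true occurrence counts, sorts the (letter, count) items once, and computes the beauty directly as sum(count * (26 - rank)) over the at most 26 ranked letters, eliminating A's rank dictionary and its second full-string scoring scan.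
import Mathlib
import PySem

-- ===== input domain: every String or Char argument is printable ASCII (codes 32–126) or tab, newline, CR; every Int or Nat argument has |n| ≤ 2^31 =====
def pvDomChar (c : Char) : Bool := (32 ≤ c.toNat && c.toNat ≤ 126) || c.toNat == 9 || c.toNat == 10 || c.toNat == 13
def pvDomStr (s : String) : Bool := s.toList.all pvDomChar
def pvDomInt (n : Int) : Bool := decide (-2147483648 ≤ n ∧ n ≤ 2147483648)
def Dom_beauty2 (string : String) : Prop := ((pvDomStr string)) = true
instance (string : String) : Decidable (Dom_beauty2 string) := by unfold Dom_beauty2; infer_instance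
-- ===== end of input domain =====

-- B replaces A's second full-string scan by a single weighted sum count*(26-rank) over the ≤26 ranked letters (objective: alternative decomposition).

-- string.ascii_lowercase; 'char in ascii_lowercase' for a single character is exactly membership of that character
def asciiLowercase : List Char := "abcdefghijklmnopqrstuvwxyz".toList

-- ===== PORT A =====
def beauty2 (string : String) : Int :=
  let lowered := PySem.Chars.lower string.toList     -- string = string.lower()
  let letters : PySem.Dict Char Int :=
    lowered.foldl (fun d c =>
      if asciiLowercase.contains c then
        if !(d.contains c) then d.insert c 0
        else d.insert c (d.getD c 0 + 1)             -- letters[char] += 1 (key present here, so getD is exact)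
      else d) PySem.Dict.empty
  -- sorted(letters, key=lambda i: letters[i], reverse=True); i is a key of letters, so getD is exact
  let frequency := PySem.List.sorted letters.keys (fun i => letters.getD i 0) true
  -- {letter: 26 - i for i, letter in enumerate(frequency)}
  let values : PySem.Dict Char Int :=
    (PySem.List.enumerate frequency).foldl (fun d p => d.insert p.2 (26 - p.1)) PySem.Dict.empty
  -- sum(values[letter] for letter in string if letter in values); letter in values, so getD is exact
  ((lowered.filter (fun c => values.contains c)).map (fun c => values.getD c 0)).sum

-- ===== PORT B =====
def beauty2_alt (string : String) : Int :=
  let counts : PySem.Dict Char Int :=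
    (PySem.Chars.lower string.toList).foldl (fun d c =>
      if asciiLowercase.contains c then d.insert c (d.getD c 0 + 1) else d) PySem.Dict.empty
  let ranked := PySem.List.sorted counts.items (fun kv => kv.2) true
  ((PySem.List.enumerate ranked).map (fun p => p.2.2 * (26 - p.1))).sum

-- ===== PRECONDITION & SPEC =====
def Spec_beauty2 (string : String) (out : Int) : Prop := out = beauty2_alt string
instance (string : String) (out : Int) : Decidable (Spec_beauty2 string out) := by unfold Spec_beauty2; infer_instance

-- ===== CLAIM (what is proved, stated in full; the proofs are below) =====
def Claim_equal_beauty2 : Prop := ∀ (string : String), Dom_beauty2 string → Spec_beauty2 string (beauty2 string)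

-- ===== LEMMAS AND PROOFS =====

-- B's counting loop is Counter over the lowercase-letter subsequence
lemma counts_eq_counter (l : List Char) :
    l.foldl (fun d c => if asciiLowercase.contains c then d.insert c (d.getD c 0 + 1) else d)
      (PySem.Dict.empty : PySem.Dict Char Int)
    = PySem.Dict.counter (l.filter (fun c => asciiLowercase.contains c)) := by
  rw [← PySem.Dict.foldl_insert_getD_add_one_eq_counter, List.foldl_filter]

-- get? through a value-adjusting map of the items
lemma get?_map_sub (l : List (Char × Int)) (c : Char) :
    (PySem.Dict.mk (l.map (fun p => (p.1, p.2 - 1)))).get? c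
      = ((PySem.Dict.mk l).get? c).map (fun v => v - 1) := by
  induction l with
  | nil => rfl
  | cons p rest ih =>
      obtain ⟨k, v⟩ := p
      simp only [List.map_cons, PySem.Dict.get?_mk_cons]
      by_cases h : k == c <;> simp [h, ih]

-- A's dict loop keeps (count - 1) where B's keeps count, same keys in the same order
lemma letters_rel (l : List Char) :
    ∀ (dB dA : PySem.Dict Char Int),
      dA.items = dB.items.map (fun p => (p.1, p.2 - 1)) →
      (l.foldl (fun d c =>
        if asciiLowercase.contains c then
          if !(d.contains c) then d.insert c 0 else d.insert c (d.getD c 0 + 1)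
        else d) dA).items
      = ((l.foldl (fun d c =>
          if asciiLowercase.contains c then d.insert c (d.getD c 0 + 1) else d) dB).items).map
          (fun p => (p.1, p.2 - 1)) := by
  induction l with
  | nil => intro dB dA h; simpa using h
  | cons c rest ih =>
      intro dB dA h
      by_cases hP : asciiLowercase.contains c
      · simp only [List.foldl_cons, hP, if_true]
        have hkeys : dA.keys = dB.keys := by
          simp only [PySem.Dict.keys, h, List.map_map]; rfl
        have hcont : dA.contains c = dB.contains c := by
          rw [PySem.Dict.contains_eq_decide_mem_keys, PySem.Dict.contains_eq_decide_mem_keys, hkeys]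
        have hget? : dA.get? c = (dB.get? c).map (fun v => v - 1) := by
          obtain ⟨la⟩ := dA; obtain ⟨lb⟩ := dB
          simp only at h; rw [h]; exact get?_map_sub lb c
        by_cases hc : dB.contains c
        · have hcA : dA.contains c := by rw [hcont]; exact hc
          obtain ⟨v, hv⟩ : ∃ v, dB.get? c = some v := by
            have := PySem.Dict.contains_eq_isSome_get? dB c
            rw [hc] at this; exact Option.isSome_iff_exists.mp this.symm
          have hget : dA.getD c 0 = dB.getD c 0 - 1 := by
            rw [PySem.Dict.getD_eq_get?_getD, PySem.Dict.getD_eq_get?_getD, hget?, hv]; rfl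
          simp only [hcA, Bool.not_true, Bool.false_eq_true, if_false]
          apply ih
          rw [PySem.Dict.items_insert_of_contains dA _ hcA,
              PySem.Dict.items_insert_of_contains dB _ hc, h, List.map_map, List.map_map]
          apply List.map_congr_left
          intro p _
          obtain ⟨q, v⟩ := p
          simp [hget, Prod.ext_iff]
          by_cases hqc : q = c <;> simp [hqc]
        · have hcB : dB.contains c = false := eq_false_of_ne_true hc
          have hcA : dA.contains c = false := by rw [hcont]; exact hcB
          simp only [hcA, Bool.not_false, if_true]
          apply ih
          rw [PySem.Dict.items_insert_of_not_contains dA _ hcA,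
              PySem.Dict.items_insert_of_not_contains dB _ hcB,
              PySem.Dict.getD_of_not_contains dB 0 hcB, h, List.map_append]
          norm_num
      · simp only [List.foldl_cons, hP, if_false, Bool.false_eq_true]
        exact ih dB dA h
  
-- insertBy only looks at the comparison booleans
lemma insertBy_congr {α : Type} (b1 b2 : α → α → Bool) (x : α) :
    ∀ (ys : List α), (∀ y ∈ ys, b1 x y = b2 x y) →
      PySem.List.insertBy b1 x ys = PySem.List.insertBy b2 x ys := by
  intro ys
  induction ys with
  | nil => intro _; rfl
  | cons y ys ih =>
      intro h
      simp only [PySem.List.insertBy]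
      rw [h y (by simp)]
      by_cases hb : b2 x y <;> simp [hb, ih (fun z hz => h z (by simp [hz]))]

lemma foldl_insertBy_congr {α : Type} (b1 b2 : α → α → Bool) (S : List α)
    (hb : ∀ x ∈ S, ∀ y ∈ S, b1 x y = b2 x y) :
    ∀ (l acc : List α), (∀ y ∈ l, y ∈ S) → (∀ y ∈ acc, y ∈ S) →
      l.foldl (fun a x => PySem.List.insertBy b1 x a) acc
        = l.foldl (fun a x => PySem.List.insertBy b2 x a) acc := by
  intro l
  induction l with
  | nil => intro _ _ _; rfl
  | cons x l ih =>
      intro acc hl hacc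
      simp only [List.foldl_cons]
      rw [insertBy_congr b1 b2 x acc (fun y hy => hb x (hl x (by simp)) y (hacc y hy))]
      exact ih _ (fun y hy => hl y (by simp [hy]))
        (fun y hy => by
          rcases (PySem.List.mem_insertBy _ _ _ _).mp hy with h | h
          · exact h ▸ hl x (by simp)
          · exact hacc y h)

-- sorted(…, reverse=True) only depends on the order the key induces on the list's elements
lemma sorted_rev_congr {α : Type} (k1 k2 : α → Int) (K : List α)
    (h : ∀ a ∈ K, ∀ b ∈ K, (k1 a < k1 b ↔ k2 a < k2 b)) :
    PySem.List.sorted K k1 true = PySem.List.sorted K k2 true := by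
  rw [PySem.List.sorted_rev_eq_foldl_insertBy, PySem.List.sorted_rev_eq_foldl_insertBy]
  exact foldl_insertBy_congr _ _ K
    (fun x hx y hy => by
      simp only [decide_eq_decide]; exact h y hy x hx)
    K [] (fun y hy => hy) (by simp)

lemma insertBy_map {α β : Type} (h : α → β) (bβ : β → β → Bool) (bα : α → α → Bool)
    (hc : ∀ x y, bβ (h x) (h y) = bα x y) (x : α) :
    ∀ (ys : List α), PySem.List.insertBy bβ (h x) (ys.map h) = (PySem.List.insertBy bα x ys).map h := by
  intro ys
  induction ys with
  | nil => rfl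
  | cons y ys ih =>
      simp only [List.map_cons, PySem.List.insertBy, hc]
      by_cases hb : bα x y <;> simp [hb, ih]

-- sorted(map h K, key=g, reverse=True) = map h (sorted(K, key=g∘h, reverse=True))
lemma sorted_rev_map {α β : Type} (h : α → β) (g : β → Int) (K : List α) :
    PySem.List.sorted (K.map h) g true = (PySem.List.sorted K (fun k => g (h k)) true).map h := by
  rw [PySem.List.sorted_rev_eq_foldl_insertBy, PySem.List.sorted_rev_eq_foldl_insertBy]
  have aux : ∀ (l acc : List α),
      (l.map h).foldl (fun a x => PySem.List.insertBy (fun a b => decide (g b < g a)) x a) (acc.map h)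
        = (l.foldl (fun a x => PySem.List.insertBy (fun a b => decide (g (h b) < g (h a))) x a) acc).map h := by
    intro l
    induction l with
    | nil => intro acc; rfl
    | cons x l ih =>
        intro acc
        simp only [List.map_cons, List.foldl_cons]
        rw [insertBy_map h _ _ (fun _ _ => rfl) x acc, ih]
  simpa using aux K []

lemma enumerate_map {α β : Type} (h : α → β) (l : List α) :
    ∀ (s : Int), PySem.List.enumerate (l.map h) s
      = (PySem.List.enumerate l s).map (fun p => (p.1, h p.2)) := by
  induction l with
  | nil => intro s; rfl
  | cons x l ih =>
      intro s
      simp [PySem.List.enumerate_cons, ih]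

-- if k = c contributes w c once over a Nodup list containing c
lemma sum_map_ite_single (w : Char → Int) (c : Char) :
    ∀ (F : List Char), F.Nodup → c ∈ F →
      (F.map (fun k => if c = k then w k else 0)).sum = w c := by
  intro F
  induction F with
  | nil => intro _ h; simp at h
  | cons k F ih =>
      intro hnd hc
      rcases List.mem_cons.mp hc with h | h
      · subst h
        have : ∀ x ∈ F, (if c = x then w x else 0) = 0 := by
          intro x hx
          have : c ≠ x := fun he => (List.nodup_cons.mp hnd).1 (he ▸ hx)
          simp [this]
        simp [List.map_congr_left this]
      · have : c ≠ k := fun he => (List.nodup_cons.mp hnd).1 (he ▸ h)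
        simp [this, ih (List.nodup_cons.mp hnd).2 h]

-- grouping: a sum over occurrences is a sum of count * weight over the distinct elements
lemma sum_map_eq_sum_count (w : Char → Int) (F : List Char) (hF : F.Nodup) :
    ∀ (l : List Char), (∀ c ∈ l, c ∈ F) →
      (l.map w).sum = (F.map (fun k => (l.count k : Int) * w k)).sum := by
  intro l
  induction l with
  | nil => intro _; simp
  | cons c l ih =>
      intro h
      have hrw : ∀ k ∈ F, ((c :: l).count k : Int) * w k
          = (l.count k : Int) * w k + (if c = k then w k else 0) := by
        intro k _
        by_cases hck : c = k
        · subst hck; simp [List.count_cons_self]; ring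
        · simp [hck]
      rw [List.map_congr_left hrw, PySem.List.sum_map_add_int,
          sum_map_ite_single w c F hF (h c (by simp))]
      simp only [List.map_cons, List.sum_cons]
      rw [ih (fun x hx => h x (by simp [hx]))]
      ring

-- proof-side names for the ports' intermediate values (defeq to the ports' let-bindings)
def lettersD (lowered : List Char) : PySem.Dict Char Int :=
  lowered.foldl (fun d c =>
    if asciiLowercase.contains c then
      if !(d.contains c) then d.insert c 0 else d.insert c (d.getD c 0 + 1)
    else d) PySem.Dict.empty

def freqL (lowered : List Char) : List Char :=
  PySem.List.sorted (lettersD lowered).keys (fun i => (lettersD lowered).getD i 0) true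

def valuesD (lowered : List Char) : PySem.Dict Char Int :=
  (PySem.List.enumerate (freqL lowered)).foldl (fun d p => d.insert p.2 (26 - p.1)) PySem.Dict.empty

def countsD (lowered : List Char) : PySem.Dict Char Int :=
  lowered.foldl (fun d c =>
    if asciiLowercase.contains c then d.insert c (d.getD c 0 + 1) else d) PySem.Dict.empty

def rankedL (lowered : List Char) : List (Char × Int) :=
  PySem.List.sorted (countsD lowered).items (fun kv => kv.2) true

lemma beauty2_def (s : String) :
    beauty2 s = ((((PySem.Chars.lower s.toList).filter
        (fun c => (valuesD (PySem.Chars.lower s.toList)).contains c)).map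
        (fun c => (valuesD (PySem.Chars.lower s.toList)).getD c 0)).sum) := rfl

lemma beauty2_alt_def (s : String) :
    beauty2_alt s = ((PySem.List.enumerate (rankedL (PySem.Chars.lower s.toList))).map
        (fun p => p.2.2 * (26 - p.1))).sum := rfl

def filL (L : List Char) : List Char := L.filter (fun c => asciiLowercase.contains c)
def KL (L : List Char) : List Char := PySem.Set.ofList (filL L)
def cntL (L : List Char) (k : Char) : Int := ((filL L).count k : Int)

-- main equality, over the lowered character list
lemma core (L : List Char) :
    ((L.filter (fun c => (valuesD L).contains c)).map (fun c => (valuesD L).getD c 0)).sum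
    = ((PySem.List.enumerate (rankedL L)).map (fun p => p.2.2 * (26 - p.1))).sum := by
  have h1 : countsD L = PySem.Dict.counter (filL L) := by
    unfold countsD filL; exact counts_eq_counter L
  have h2 : (lettersD L).items = ((countsD L).items).map (fun p => (p.1, p.2 - 1)) := by
    unfold lettersD countsD; exact letters_rel L _ _ rfl
  have h3 : (countsD L).items = (KL L).map (fun k => (k, cntL L k)) := by
    rw [h1]; unfold KL cntL; exact PySem.Dict.items_counter (filL L)
  have h4 : (lettersD L).items = (KL L).map (fun k => (k, cntL L k - 1)) := by
    rw [h2, h3, List.map_map]; rfl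
  have h5 : (lettersD L).keys = KL L := by
    have hm : ((lettersD L).items).map (fun p => p.1) = KL L := by
      rw [h4, List.map_map]
      have hid : List.map ((fun p : Char × Int => p.1) ∘ (fun k => (k, cntL L k - 1))) (KL L)
          = List.map id (KL L) := List.map_congr_left (fun k _ => rfl)
      rw [hid, List.map_id]
    exact hm
  have hKnd : (KL L).Nodup := PySem.Set.nodup_ofList (filL L)
  have h6 : ∀ i ∈ KL L, (lettersD L).getD i 0 = cntL L i - 1 := by
    intro i hi
    exact PySem.Dict.getD_of_mem_items _ (by rw [h4]; exact List.mem_map_of_mem hi)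
      (by rw [h5]; exact hKnd) 0
  have h7 : freqL L = PySem.List.sorted (KL L) (cntL L) true := by
    unfold freqL
    rw [h5]
    apply sorted_rev_congr
    intro a ha b hb
    rw [h6 a ha, h6 b hb]
    omega
  have hFnd : (freqL L).Nodup := by
    rw [h7]; exact ((PySem.List.sorted_perm (KL L) (cntL L) true).nodup_iff).mpr hKnd
  have hmemF : ∀ c : Char, c ∈ freqL L ↔ c ∈ filL L := by
    intro c
    rw [h7, PySem.List.mem_sorted]
    exact PySem.Set.mem_ofList (filL L) c
  have h8 : rankedL L = (freqL L).map (fun k => (k, cntL L k)) := by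
    unfold rankedL
    rw [h3, sorted_rev_map (fun k => (k, cntL L k)) (fun kv => kv.2) (KL L)]
    rw [show (fun k => ((k : Char), cntL L k).2) = cntL L from rfl, ← h7]
  have h9 : (valuesD L).items
      = (PySem.List.enumerate (freqL L)).map (fun p => (p.2, 26 - p.1)) := by
    unfold valuesD
    have := PySem.Dict.items_foldl_insert_fresh (PySem.List.enumerate (freqL L))
      (fun p => p.2) (fun p => 26 - p.1) PySem.Dict.empty
      (fun a _ => PySem.Dict.contains_empty _)
      (by rw [PySem.List.map_snd_enumerate]; exact hFnd)
    simpa using this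
  have h10 : (valuesD L).keys = freqL L := by
    simp only [PySem.Dict.keys, h9, List.map_map]
    exact PySem.List.map_snd_enumerate (freqL L) 0
  have hVnd : (valuesD L).keys.Nodup := by rw [h10]; exact hFnd
  have h11 : ∀ c ∈ L, (valuesD L).contains c = asciiLowercase.contains c := by
    intro c hc
    rw [PySem.Dict.contains_eq_decide_mem_keys, h10]
    cases hA : asciiLowercase.contains c
    · simp only [decide_eq_false_iff_not]
      intro hmem
      have hmf := (hmemF c).mp hmem
      unfold filL at hmf
      rw [List.mem_filter, hA] at hmf
      exact Bool.false_ne_true hmf.2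
    · simp only [decide_eq_true_eq]
      refine (hmemF c).mpr ?_
      unfold filL
      rw [List.mem_filter]
      exact ⟨hc, hA⟩
  have h12 : L.filter (fun c => (valuesD L).contains c) = filL L := by
    unfold filL; exact List.filter_congr h11
  have h13 : ∀ p ∈ PySem.List.enumerate (freqL L), (valuesD L).getD p.2 0 = 26 - p.1 := by
    intro p hp
    refine PySem.Dict.getD_of_mem_items _ ?_ hVnd 0
    rw [h9]
    exact List.mem_map_of_mem hp
  have hsub : ∀ c ∈ filL L, c ∈ freqL L := fun c hc => (hmemF c).mpr hc
  rw [h12, sum_map_eq_sum_count (fun c => (valuesD L).getD c 0) (freqL L) hFnd (filL L) hsub]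
  rw [h8, enumerate_map (fun k => (k, cntL L k)) (freqL L) 0, List.map_map]
  conv_lhs => rw [show freqL L = (PySem.List.enumerate (freqL L) 0).map (fun p => p.2)
    from (PySem.List.map_snd_enumerate (freqL L) 0).symm, List.map_map]
  apply congrArg List.sum
  apply List.map_congr_left
  intro p hp
  simp only [Function.comp]
  rw [h13 p hp]
  unfold cntL
  ring

lemma beauty2_eq (s : String) : beauty2 s = beauty2_alt s := by
  rw [beauty2_def, beauty2_alt_def]
  exact core (PySem.Chars.lower s.toList)

-- ===== VERDICT (by name: the statement is the Claim_ definition above) =====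
theorem beauty2_spec : Claim_equal_beauty2 := by
  intro s _
  unfold Spec_beauty2
  exact beauty2_eq s
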